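-- pv_equiv track=rewrite | github.com/aremzy03/alx-higher_level_programming | 0x03-python-data_structures/4-new_in_list.py | new_in_list
-- ===== SOURCE A (Python) =====
-- def new_in_list(my_list, idx, element):
--     count = 0
--     n_list = []
--     for item in my_list:
--         if count == idx:
--             n_list.append(element)
--         else:
--             n_list.append(item)
--         count += 1
--     return n_list
-- ===== SOURCE B (Python) =====
-- def new_in_list(my_list, idx, element):
--     n_list = my_list[:]
--     if 0 <= idx < len(my_list):
--         n_list[idx] = element
--     return n_list
-- ===== Notes on version B (the rewrite author's own statement) =====
-- stated objective: simpler
-- what changed: Replaced the element-by-element loop with a per-item branch and manual counter by a single bulk slice copy followed by one guarded indexed assignment.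
import Mathlib
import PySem

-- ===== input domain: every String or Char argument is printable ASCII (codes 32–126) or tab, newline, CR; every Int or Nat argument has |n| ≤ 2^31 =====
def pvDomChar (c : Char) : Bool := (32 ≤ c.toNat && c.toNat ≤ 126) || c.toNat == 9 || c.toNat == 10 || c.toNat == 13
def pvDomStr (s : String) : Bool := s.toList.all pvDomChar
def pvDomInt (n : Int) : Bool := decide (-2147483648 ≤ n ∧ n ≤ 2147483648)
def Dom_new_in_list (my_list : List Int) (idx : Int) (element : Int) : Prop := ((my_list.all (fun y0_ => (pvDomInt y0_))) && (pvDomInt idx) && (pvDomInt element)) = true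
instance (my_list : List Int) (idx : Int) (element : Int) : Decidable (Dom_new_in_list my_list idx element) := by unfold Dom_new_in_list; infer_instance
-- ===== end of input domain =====

-- B replaces A's counting loop with a bulk copy plus one guarded indexed assignment (simpler; same O(n) cost).

-- ===== PORT A =====
-- the loop over my_list with state (count, n_list)
def new_in_list (my_list : List Int) (idx : Int) (element : Int) : List Int :=
  (my_list.foldl
    (fun (st : Int × List Int) item =>
      (st.1 + 1, if st.1 = idx then st.2 ++ [element] else st.2 ++ [item]))
    (0, [])).2

-- ===== PORT B =====
-- n_list = my_list[:]; if 0 <= idx < len(my_list): n_list[idx] = element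
def new_in_list_alt (my_list : List Int) (idx : Int) (element : Int) : List Int :=
  if 0 ≤ idx ∧ idx < my_list.length then my_list.set idx.toNat element else my_list

-- ===== PRECONDITION & SPEC =====
def Spec_new_in_list (my_list : List Int) (idx : Int) (element : Int) (out : List Int) : Prop := out = new_in_list_alt my_list idx element
instance (my_list : List Int) (idx : Int) (element : Int) (out : List Int) : Decidable (Spec_new_in_list my_list idx element out) := by unfold Spec_new_in_list; infer_instance

-- ===== CLAIM (what is proved, stated in full; the proofs are below) =====
def Claim_equal_new_in_list : Prop := ∀ (my_list : List Int) (idx : Int) (element : Int), Dom_new_in_list my_list idx element → Spec_new_in_list my_list idx element (new_in_list my_list idx element)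

-- ===== LEMMAS AND PROOFS =====

theorem new_in_list_loop (l : List Int) (idx element : Int) (c : Int) (acc : List Int) :
    (l.foldl
      (fun (st : Int × List Int) item =>
        (st.1 + 1, if st.1 = idx then st.2 ++ [element] else st.2 ++ [item]))
      (c, acc)).2
    = acc ++ (if 0 ≤ idx - c ∧ idx - c < l.length then l.set (idx - c).toNat element else l) := by
  induction l generalizing c acc with
  | nil => simp
  | cons a t ih =>
    simp only [List.foldl_cons, ih, List.length_cons]
    push_cast
    by_cases h1 : c = idx <;>
      by_cases h2 : 0 ≤ idx - (c + 1) ∧ idx - (c + 1) < (t.length : Int) <;>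
        by_cases h3 : 0 ≤ idx - c ∧ idx - c < ((t.length : Int) + 1)
    · exact absurd h2 (by omega)
    · exact absurd h2 (by omega)
    · have h0 : (idx - c).toNat = 0 := by omega
      rw [if_pos h1, if_neg h2, if_pos h3, h0]
      simp
    · exact absurd h3 (by omega)
    · have h5 : (idx - c).toNat = (idx - (c + 1)).toNat + 1 := by omega
      rw [if_neg h1, if_pos h2, if_pos h3, h5]
      simp
    · exact absurd h3 (by omega)
    · exact absurd h2 (by omega)
    · rw [if_neg h1, if_neg h2, if_neg h3]
      simp

-- ===== VERDICT (by name: the statement is the Claim_ definition above) =====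
theorem new_in_list_spec : Claim_equal_new_in_list := by
  intro my_list idx element _
  unfold Spec_new_in_list new_in_list new_in_list_alt
  rw [new_in_list_loop]
  simp
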